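-- pv_equiv track=rewrite | github.com/asweigart/programmedpatterns | book/visualpatterns.py | formula30
-- ===== SOURCE A (Python) =====
-- def formula30(step):
--     count = 1
--     i = 2
--     while True:
--         if i > step:
--             break
--         count += 2
--         i += 1
--
--         if i > step:
--             break
--         count += 1
--         i += 1
--     return count
-- ===== SOURCE B (Python) =====
-- def formula30(step):
--     # Closed form: the loop adds 2 for each even i in [2, step] and 1 for each odd one,
--     # so the total is step + step//2 once step >= 2, and the initial 1 otherwise.
--     return 1 if step < 2 else step + step // 2
-- ===== Notes on version B (the rewrite author's own statement) =====
-- stated objective: faster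
-- what changed: replaced the alternating +2/+1 accumulation loop over i in [2,step] with the closed-form expression step + step//2
import Mathlib
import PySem

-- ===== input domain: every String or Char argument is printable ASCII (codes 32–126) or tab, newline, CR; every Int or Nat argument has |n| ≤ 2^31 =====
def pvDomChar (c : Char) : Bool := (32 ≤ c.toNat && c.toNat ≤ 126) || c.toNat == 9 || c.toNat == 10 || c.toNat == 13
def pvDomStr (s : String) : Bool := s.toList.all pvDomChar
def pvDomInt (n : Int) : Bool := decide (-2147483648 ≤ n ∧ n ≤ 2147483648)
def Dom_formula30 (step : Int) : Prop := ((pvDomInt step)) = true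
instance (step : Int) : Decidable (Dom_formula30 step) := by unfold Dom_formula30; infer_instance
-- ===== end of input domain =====

-- B replaces A's alternating +2/+1 loop by the closed form step + step//2 (O(step) -> O(1)).


-- ===== PORT A =====
-- the 'while True' loop: each pass checks i > step, adds 2, increments, checks again, adds 1, increments
def formula30Loop (step count i : Int) : Int :=
  if i > step then count
  else
    if i + 1 > step then count + 2
    else formula30Loop step (count + 2 + 1) (i + 1 + 1)
termination_by (step - i).toNat
decreasing_by omega

def formula30 (step : Int) : Int := formula30Loop step 1 2

-- ===== PORT B =====
def formula30_alt (step : Int) : Int :=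
  if step < 2 then 1 else step + PySem.Int.floordiv step 2

-- ===== PRECONDITION & SPEC =====
def Spec_formula30 (step : Int) (out : Int) : Prop := out = formula30_alt step
instance (step : Int) (out : Int) : Decidable (Spec_formula30 step out) := by unfold Spec_formula30; infer_instance

-- ===== CLAIM (what is proved, stated in full; the proofs are below) =====
def Claim_equal_formula30 : Prop := ∀ (step : Int), Dom_formula30 step → Spec_formula30 step (formula30 step)

-- ===== LEMMAS AND PROOFS =====
-- The loop's total addition depends only on d = step - i: 3*(d/2) + d%2 + 2 when 0 ≤ d.
theorem formula30Loop_eq (n : Nat) :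
    ∀ step count i : Int, i ≤ step + 1 → (step - i).toNat = n →
      formula30Loop step count i = count + 3 * ((step - i) / 2) + (step - i) % 2 + 2 := by
  induction n using Nat.strong_induction_on with
  | _ n ih =>
    intro step count i hle hn
    unfold formula30Loop
    split
    · omega
    · split
      · omega
      · rw [ih ((step - (i + 1 + 1)).toNat) (by omega) step (count + 2 + 1) (i + 1 + 1)
            (by omega) rfl]
        omega

-- ===== VERDICT (by name: the statement is the Claim_ definition above) =====
theorem formula30_spec : Claim_equal_formula30 := by
  intro step _
  unfold Spec_formula30 formula30 formula30_alt
  by_cases h : step < 2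
  · rw [if_pos h]
    unfold formula30Loop
    rw [if_pos (by omega)]
  · rw [if_neg h, formula30Loop_eq ((step - 2).toNat) step 1 2 (by omega) rfl,
      PySem.Int.floordiv_eq_ediv_of_pos (by norm_num)]
    omega
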